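-- pv_equiv track=rewrite | github.com/rlagycks/2025-SWCAMP-Python | forget-mars/door_hacking.py | generate_password
-- ===== SOURCE A (Python) =====
-- import string
--
-- CHARSET = string.digits + string.ascii_lowercase
--
-- PASSWORD_LENGTH = 6
--
-- def generate_password(index: int) -> str:
--     """정수 인덱스를 기반으로 6자리 비밀번호를 생성합니다."""
--     base = len(CHARSET)
--     password_chars = []
--
--     temp_index = index
--     for _ in range(PASSWORD_LENGTH):
--         temp_index, remainder = divmod(temp_index, base)
--         password_chars.append(CHARSET[remainder])
--
--     return "".join(reversed(password_chars))
-- ===== SOURCE B (Python) =====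
-- import string
--
-- CHARSET = string.digits + string.ascii_lowercase
--
-- PASSWORD_LENGTH = 6
--
-- def generate_password(index: int) -> str:
--     """Build the 6-char base-36 password left-to-right, one digit per position."""
--     base = len(CHARSET)
--     return "".join(
--         CHARSET[(index // base ** (PASSWORD_LENGTH - 1 - i)) % base]
--         for i in range(PASSWORD_LENGTH)
--     )
-- ===== Notes on version B (the rewrite author's own statement) =====
-- stated objective: simpler
-- what changed: Replaced the running-quotient divmod loop with accumulator list and final reversal by a single left-to-right comprehension that computes each digit directly as (index // base**(PASSWORD_LENGTH-1-i)) % base.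
import Mathlib
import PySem

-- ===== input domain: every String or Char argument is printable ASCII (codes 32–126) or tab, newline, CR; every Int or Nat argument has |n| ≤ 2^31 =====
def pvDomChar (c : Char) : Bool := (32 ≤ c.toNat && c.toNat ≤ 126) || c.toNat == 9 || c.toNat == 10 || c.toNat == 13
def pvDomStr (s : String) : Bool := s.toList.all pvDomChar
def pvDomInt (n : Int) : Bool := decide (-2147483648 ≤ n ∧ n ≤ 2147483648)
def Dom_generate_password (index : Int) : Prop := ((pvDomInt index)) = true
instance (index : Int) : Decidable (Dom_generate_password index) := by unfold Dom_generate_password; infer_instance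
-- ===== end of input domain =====

-- B replaces A's running-quotient loop + final reversal by computing each of the 6
-- digits directly as (index // 36^(5-i)) % 36, building the string left-to-right (objective: simpler).

-- CHARSET = string.digits + string.ascii_lowercase
def pvCharset : List Char := "0123456789abcdefghijklmnopqrstuvwxyz".toList

-- ===== PORT A =====
-- remainder is always in [0, 36), so CHARSET[remainder] never raises; .getD ' ' is unreachable
def generate_password (index : Int) : String :=
  let base : Int := 36   -- len(CHARSET)
  let st := (PySem.List.pyRange 0 6 1).foldl
    (fun (st : Int × List Char) _ =>
      let t := PySem.Int.floordiv st.1 base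
      let r := PySem.Int.mod st.1 base
      (t, st.2 ++ [(PySem.List.pyGet? pvCharset r).getD ' ']))
    (index, [])
  String.mk st.2.reverse

-- ===== PORT B =====
def generate_password_alt (index : Int) : String :=
  let base : Int := 36   -- len(CHARSET)
  String.mk ((PySem.List.pyRange 0 6 1).map (fun i =>
    (PySem.List.pyGet? pvCharset
      (PySem.Int.mod (PySem.Int.floordiv index (base ^ ((5 : Int) - i).toNat)) base)).getD ' '))

-- ===== PRECONDITION & SPEC =====
def Spec_generate_password (index : Int) (out : String) : Prop := out = generate_password_alt index
instance (index : Int) (out : String) : Decidable (Spec_generate_password index out) := by unfold Spec_generate_password; infer_instance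

-- ===== CLAIM (what is proved, stated in full; the proofs are below) =====
def Claim_equal_generate_password : Prop := ∀ (index : Int), Dom_generate_password index → Spec_generate_password index (generate_password index)

-- ===== LEMMAS AND PROOFS =====

theorem pv_fd_fd (n a b : Int) (ha : 0 < a) (hb : 0 < b) :
    PySem.Int.floordiv (PySem.Int.floordiv n a) b = PySem.Int.floordiv n (a * b) := by
  rw [PySem.Int.floordiv_eq_ediv_of_pos ha, PySem.Int.floordiv_eq_ediv_of_pos hb,
      PySem.Int.floordiv_eq_ediv_of_pos (by positivity)]
  exact Int.ediv_ediv_of_nonneg (le_of_lt ha)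

theorem pv_fd_one (n : Int) : PySem.Int.floordiv n 1 = n := by
  rw [PySem.Int.floordiv_eq_ediv_of_pos (by norm_num)]; exact Int.ediv_one n

-- ===== VERDICT (by name: the statement is the Claim_ definition above) =====
theorem generate_password_spec : Claim_equal_generate_password := by
  intro n _
  unfold Spec_generate_password generate_password generate_password_alt
  have hr : PySem.List.pyRange 0 6 1 = [0, 1, 2, 3, 4, 5] := by decide
  rw [hr]
  simp only [List.foldl, List.map, List.reverse]
  have h2 : PySem.Int.floordiv (PySem.Int.floordiv n 36) 36 = PySem.Int.floordiv n 1296 := by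
    rw [pv_fd_fd n 36 36 (by norm_num) (by norm_num)]; norm_num
  have h3 : PySem.Int.floordiv (PySem.Int.floordiv n 1296) 36 = PySem.Int.floordiv n 46656 := by
    rw [pv_fd_fd n 1296 36 (by norm_num) (by norm_num)]; norm_num
  have h4 : PySem.Int.floordiv (PySem.Int.floordiv n 46656) 36 = PySem.Int.floordiv n 1679616 := by
    rw [pv_fd_fd n 46656 36 (by norm_num) (by norm_num)]; norm_num
  have h5 : PySem.Int.floordiv (PySem.Int.floordiv n 1679616) 36 = PySem.Int.floordiv n 60466176 := by
    rw [pv_fd_fd n 1679616 36 (by norm_num) (by norm_num)]; norm_num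
  simp only [h2, h3, h4, h5]
  norm_num [pv_fd_one, show Int.toNat 5 = 5 from rfl, show Int.toNat 4 = 4 from rfl,
    show Int.toNat 3 = 3 from rfl, show Int.toNat 2 = 2 from rfl]
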